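-- pv_equiv track=rewrite | github.com/Spruked/KayGee_1.0 | Kay_Gee_1.0/src/reasoning/recursive_loop.py | _find_alternative
-- ===== SOURCE A (Python) =====
-- from typing import Dict, List, Any, Optional
--
-- def _find_alternative(situation: Dict, rejected_action: str) -> str:
--     """Find alternative action"""
--     alternatives = [
--         'listen_and_empathize',
--         'ask_clarifying_question',
--         'suggest_reflection',
--         'provide_gentle_guidance'
--     ]
--
--     for alt in alternatives:
--         if alt != rejected_action:
--             return alt
--
--     return 'listen_and_empathize'  # Safe default
-- ===== SOURCE B (Python) =====
-- def _find_alternative(situation, rejected_action):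
--     """Find alternative action (closed form: the first alternative is
--     'listen_and_empathize'; only if that is rejected does the loop fall to
--     'ask_clarifying_question'; the rest is unreachable)."""
--     if rejected_action == 'listen_and_empathize':
--         return 'ask_clarifying_question'
--     return 'listen_and_empathize'
-- ===== Notes on version B (the rewrite author's own statement) =====
-- stated objective: simpler
-- what changed: Replaced the loop over the four constant alternatives (plus a dead safe-default) with a single closed-form conditional: 'ask_clarifying_question' iff the rejected action is 'listen_and_empathize', else 'listen_and_empathize'.
import Mathlib
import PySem

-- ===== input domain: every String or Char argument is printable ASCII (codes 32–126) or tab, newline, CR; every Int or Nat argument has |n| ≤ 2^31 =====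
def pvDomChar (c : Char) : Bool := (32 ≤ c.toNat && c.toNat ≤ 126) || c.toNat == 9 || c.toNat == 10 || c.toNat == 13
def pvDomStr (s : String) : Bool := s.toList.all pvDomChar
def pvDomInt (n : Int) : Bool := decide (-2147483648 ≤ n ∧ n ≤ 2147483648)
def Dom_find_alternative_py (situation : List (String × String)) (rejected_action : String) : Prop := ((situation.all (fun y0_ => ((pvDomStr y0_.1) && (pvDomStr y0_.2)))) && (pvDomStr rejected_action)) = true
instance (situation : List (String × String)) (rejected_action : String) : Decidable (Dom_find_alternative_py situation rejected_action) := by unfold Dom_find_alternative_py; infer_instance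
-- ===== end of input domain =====

-- B replaces A's loop over four constant alternatives with one closed-form conditional (objective: simpler).

-- ===== PORT A =====
-- literal transliteration: loop over the constant list, return first element ≠ rejected_action, else safe default
def findAltLoop (alts : List String) (rejected_action : String) : String :=
  match alts with
  | [] => "listen_and_empathize"  -- safe default
  | alt :: rest => if alt ≠ rejected_action then alt else findAltLoop rest rejected_action

def find_alternative_py (situation : List (String × String)) (rejected_action : String) : String :=
  let alternatives := ["listen_and_empathize", "ask_clarifying_question", "suggest_reflection", "provide_gentle_guidance"]
  findAltLoop alternatives rejected_action

-- ===== PORT B =====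
def find_alternative_py_alt (situation : List (String × String)) (rejected_action : String) : String :=
  if rejected_action = "listen_and_empathize" then "ask_clarifying_question" else "listen_and_empathize"

-- ===== PRECONDITION & SPEC =====
def Spec_find_alternative_py (situation : List (String × String)) (rejected_action : String) (out : String) : Prop := out = find_alternative_py_alt situation rejected_action
instance (situation : List (String × String)) (rejected_action : String) (out : String) : Decidable (Spec_find_alternative_py situation rejected_action out) := by unfold Spec_find_alternative_py; infer_instance

-- ===== CLAIM (what is proved, stated in full; the proofs are below) =====
def Claim_equal_find_alternative_py : Prop := ∀ (situation : List (String × String)) (rejected_action : String), Dom_find_alternative_py situation rejected_action → Spec_find_alternative_py situation rejected_action (find_alternative_py situation rejected_action)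

-- ===== LEMMAS AND PROOFS =====

-- ===== VERDICT (by name: the statement is the Claim_ definition above) =====
theorem find_alternative_py_spec : Claim_equal_find_alternative_py := by
  intro situation rejected_action _
  unfold Spec_find_alternative_py find_alternative_py find_alternative_py_alt findAltLoop
  by_cases h1 : rejected_action = "listen_and_empathize"
  · subst h1; simp [findAltLoop]
  · simp [h1, Ne.symm h1]
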